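-- pv_equiv track=rewrite | github.com/jackwaky/uncertainty_retrieval | image_ppt/wrong_attach_image_to_ppt.py | _cat_captions
-- ===== SOURCE A (Python) =====
-- def _create_modifier_from_attributes(ref_attribute, targ_attribute):
--     return ref_attribute + " and " + targ_attribute
--
-- def _cat_captions(caps, dataset):
--     I = []
--     if dataset == 'fashionIQ':
--         for i in range(len(caps)):
--             if i % 2 == 0:
--                 I.append(_create_modifier_from_attributes(caps[i], caps[i+1]))
--             else:
--                 I.append(_create_modifier_from_attributes(caps[i], caps[i-1]))
--     elif dataset == 'shoes':
--         for i in range(len(caps)):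
--             I.append(caps[i])
--     return I
-- ===== SOURCE B (Python) =====
-- def _cat_captions(caps, dataset):
--     if dataset == 'fashionIQ':
--         def pairs(rest):
--             if len(rest) < 2:
--                 return []
--             a, b = rest[0], rest[1]
--             return [a + " and " + b, b + " and " + a] + pairs(rest[2:])
--         return pairs(list(caps))
--     if dataset == 'shoes':
--         return list(caps)
--     return []
-- ===== Notes on version B (the rewrite author's own statement) =====
-- stated objective: simpler
-- what changed: B replaces A's index loop with parity test and modular-neighbour indexing by a structural recursion that peels two captions off the front at a time and emits both modifier orders per pair; no indices, no parity arithmetic; the shoes branch is list(caps) and other datasets return [] immediately.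
import Mathlib
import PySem

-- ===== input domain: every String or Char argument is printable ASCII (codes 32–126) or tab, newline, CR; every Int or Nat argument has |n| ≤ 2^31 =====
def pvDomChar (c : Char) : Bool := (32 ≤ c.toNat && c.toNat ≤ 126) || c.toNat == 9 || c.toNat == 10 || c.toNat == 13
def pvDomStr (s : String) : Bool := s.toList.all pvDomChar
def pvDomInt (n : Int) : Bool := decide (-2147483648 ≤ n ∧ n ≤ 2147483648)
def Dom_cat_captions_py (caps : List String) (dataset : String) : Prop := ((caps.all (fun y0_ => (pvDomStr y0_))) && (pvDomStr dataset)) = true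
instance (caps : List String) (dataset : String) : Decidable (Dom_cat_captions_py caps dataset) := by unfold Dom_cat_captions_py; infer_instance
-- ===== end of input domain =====

-- B replaces A's index loop with parity test by a structural recursion that peels two captions off the front per step (simpler decomposition); return-value equivalence on Pre_ (even-length fashionIQ input).


-- ===== PORT A =====
-- helper _create_modifier_from_attributes
def pvCreateModifier (ref_attribute targ_attribute : String) : String :=
  ref_attribute ++ " and " ++ targ_attribute

def cat_captions_py (caps : List String) (dataset : String) : List String :=
  if dataset = "fashionIQ" then
    (PySem.List.pyRange 0 (PySem.List.len caps) 1).foldl (fun I i =>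
      if PySem.Int.mod i 2 == 0 then
        I ++ [pvCreateModifier (PySem.List.pyGetD caps i "") (PySem.List.pyGetD caps (i + 1) "")]
      else
        I ++ [pvCreateModifier (PySem.List.pyGetD caps i "") (PySem.List.pyGetD caps (i - 1) "")]) []
  else if dataset = "shoes" then
    (PySem.List.pyRange 0 (PySem.List.len caps) 1).foldl (fun I i =>
      I ++ [PySem.List.pyGetD caps i ""]) []
  else []

-- ===== PORT B =====
-- B's inner 'pairs': 'if len(rest) < 2: return []' is the []/[x] patterns;
-- rest[0], rest[1], rest[2:] is the a :: b :: rest pattern.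
def pvPairs : List String → List String
  | a :: b :: rest => (a ++ " and " ++ b) :: (b ++ " and " ++ a) :: pvPairs rest
  | _ => []

def cat_captions_py_alt (caps : List String) (dataset : String) : List String :=
  if dataset = "fashionIQ" then pvPairs caps
  else if dataset = "shoes" then caps
  else []

-- ===== PRECONDITION & SPEC =====
-- Pre_ excludes exactly the inputs on which A raises IndexError: dataset 'fashionIQ' with an
-- odd number of captions (the last even index i reads caps[i+1] past the end).
def Pre_cat_captions_py (caps : List String) (dataset : String) : Prop :=
  dataset = "fashionIQ" → caps.length % 2 = 0
instance (caps : List String) (dataset : String) : Decidable (Pre_cat_captions_py caps dataset) := by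
  unfold Pre_cat_captions_py; infer_instance

def pvWitness_cat_captions_py : List String × String := (["red", "blue"], "fashionIQ")

def Spec_cat_captions_py (caps : List String) (dataset : String) (out : List String) : Prop := out = cat_captions_py_alt caps dataset
instance (caps : List String) (dataset : String) (out : List String) : Decidable (Spec_cat_captions_py caps dataset out) := by unfold Spec_cat_captions_py; infer_instance

-- ===== CLAIM (what is proved, stated in full; the proofs are below) =====
def Claim_equal_cat_captions_py : Prop := ∀ (caps : List String) (dataset : String), Dom_cat_captions_py caps dataset → Pre_cat_captions_py caps dataset → Spec_cat_captions_py caps dataset (cat_captions_py caps dataset)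

-- ===== LEMMAS AND PROOFS =====

-- A's loop body, with the branch pushed inside the appended singleton
def pvF (caps : List String) (i : Int) : String :=
  if PySem.Int.mod i 2 == 0 then
    pvCreateModifier (PySem.List.pyGetD caps i "") (PySem.List.pyGetD caps (i + 1) "")
  else
    pvCreateModifier (PySem.List.pyGetD caps i "") (PySem.List.pyGetD caps (i - 1) "")

theorem pv_mod_two_even (x : Int) : PySem.Int.mod (2 * x) 2 = 0 := by
  rw [PySem.Int.mod_eq_emod_of_pos (by omega)]; omega

theorem pv_mod_two_odd (x : Int) : PySem.Int.mod (2 * x + 1) 2 = 1 := by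
  rw [PySem.Int.mod_eq_emod_of_pos (by omega)]; omega

-- appending one complete pair at the back commutes with pvPairs when the prefix is even-length
theorem pvPairs_append_two (a b : String) :
    ∀ (l : List String), l.length % 2 = 0 →
      pvPairs (l ++ [a, b]) = pvPairs l ++ [a ++ " and " ++ b, b ++ " and " ++ a]
  | [], _ => by simp [pvPairs]
  | [x], h => by simp at h
  | x :: y :: rest, h => by
      simp only [List.cons_append, pvPairs]
      rw [pvPairs_append_two a b rest (by simp only [List.length_cons] at h; omega)]

-- Core: A's per-index map over range(2m) equals pvPairs of the first 2m captions.
theorem pv_pair_core (caps : List String) (m : Nat) (hm : 2 * m ≤ caps.length) :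
    (List.range (2 * m)).map (fun k : Nat => pvF caps (0 + (k : Int))) =
      pvPairs (caps.take (2 * m)) := by
  induction m with
  | zero => simp [pvPairs]
  | succ m ih =>
    have h2 : 2 * (m + 1) = (2 * m + 1) + 1 := by omega
    have hlt0 : 2 * m < caps.length := by omega
    have hlt1 : 2 * m + 1 < caps.length := by omega
    have ht : caps.take ((2 * m + 1) + 1) = caps.take (2 * m) ++ [caps[2 * m], caps[2 * m + 1]] := by
      rw [List.take_add_one, List.take_add_one,
        List.getElem?_eq_getElem hlt1, List.getElem?_eq_getElem hlt0]
      simp only [Option.toList_some, List.append_assoc, List.nil_append, List.cons_append]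
    rw [h2, List.range_succ, List.range_succ, List.map_append, List.map_append, ht,
      pvPairs_append_two _ _ _ (by simp [List.length_take]; omega), ← ih (by omega)]
    have e0 : (0 : Int) + ((2 * m : Nat) : Int) = 2 * (m : Int) := by push_cast; ring
    have e1 : (0 : Int) + ((2 * m + 1 : Nat) : Int) = 2 * (m : Int) + 1 := by push_cast; ring
    have e4 : 2 * (m : Int) + 1 - 1 = 2 * (m : Int) := by ring
    simp only [List.map_cons, List.map_nil, e0, e1, pvF, pvCreateModifier,
      pv_mod_two_even, pv_mod_two_odd, e4]
    have g0 : PySem.List.pyGetD caps (2 * (m : Int)) "" = caps[2 * m] := by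
      rw [show (2 * (m : Int)) = ((2 * m : Nat) : Int) by push_cast; ring,
        PySem.List.pyGetD_natCast, List.getD_eq_getElem caps "" hlt0]
    have g1 : PySem.List.pyGetD caps (2 * (m : Int) + 1) "" = caps[2 * m + 1] := by
      rw [show (2 * (m : Int) + 1) = ((2 * m + 1 : Nat) : Int) by push_cast; ring,
        PySem.List.pyGetD_natCast, List.getD_eq_getElem caps "" hlt1]
    simp [g0, g1]

theorem pv_fashion_eq (caps : List String) (h : caps.length % 2 = 0) :
    cat_captions_py caps "fashionIQ" = cat_captions_py_alt caps "fashionIQ" := by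
  obtain ⟨m, hm⟩ : ∃ m : Nat, caps.length = 2 * m := ⟨caps.length / 2, by have h2 := h; omega⟩
  unfold cat_captions_py cat_captions_py_alt
  rw [if_pos rfl, if_pos rfl]
  have hbody : (fun (I : List String) (i : Int) =>
      if PySem.Int.mod i 2 == 0 then
        I ++ [pvCreateModifier (PySem.List.pyGetD caps i "") (PySem.List.pyGetD caps (i + 1) "")]
      else
        I ++ [pvCreateModifier (PySem.List.pyGetD caps i "") (PySem.List.pyGetD caps (i - 1) "")]) =
      fun I i => I ++ [pvF caps i] := by
    funext I i; unfold pvF; split <;> rfl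
  rw [hbody, PySem.List.foldl_append_singleton_eq_map]
  simp only [List.nil_append, PySem.List.len_eq, hm]
  rw [PySem.List.pyRange_one, List.map_map]
  have hc : (((2 * m : Nat) : Int) - 0).toNat = 2 * m := by push_cast; omega
  rw [hc]
  have := pv_pair_core caps m (by omega)
  rw [show caps.take (2 * m) = caps by rw [← hm]; exact List.take_length] at this
  simpa using this

theorem pv_shoes_eq (caps : List String) :
    cat_captions_py caps "shoes" = cat_captions_py_alt caps "shoes" := by
  have halt : cat_captions_py_alt caps "shoes" = caps := by
    unfold cat_captions_py_alt
    rw [if_neg (show ¬("shoes" : String) = "fashionIQ" by decide), if_pos rfl]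
  unfold cat_captions_py
  rw [if_neg (show ¬("shoes" : String) = "fashionIQ" by decide), if_pos rfl,
    PySem.List.foldl_append_singleton_eq_map, halt]
  simp only [List.nil_append, PySem.List.len_eq]
  exact PySem.List.map_pyGetD_pyRange_zero' caps ""

-- ===== VERDICT (by name: the statement is the Claim_ definition above) =====
theorem cat_captions_py_spec : Claim_equal_cat_captions_py := by
  intro caps dataset _hd hpre
  unfold Spec_cat_captions_py
  by_cases hf : dataset = "fashionIQ"
  · subst hf; exact pv_fashion_eq caps (hpre rfl)
  by_cases hs : dataset = "shoes"
  · subst hs; exact pv_shoes_eq caps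
  · unfold cat_captions_py cat_captions_py_alt
    rw [if_neg hf, if_neg hs, if_neg hf, if_neg hs]
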